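-- pv_equiv track=rewrite | github.com/Isaac-Lee/BOJ-Algorithm | Python_Solutions/24447.py | BFS
-- ===== SOURCE A (Python) =====
-- from collections import deque
--
-- def BFS(G, N, R):
--     visited = set()
--     visit_count = 0
--     visit = [-1] * (N+1)
--     queue = deque([[R, 0]])
--     while queue:
--         n, d = queue.popleft()
--         if n in visited:
--             continue
--         visited.add(n)
--         visit_count += 1
--         visit[n] = d * visit_count
--         for v in sorted(G[n]):
--             queue.append([v, d+1])
--     return visit[1:]
-- ===== SOURCE B (Python) =====
-- def BFS(G, N, R):
--     # level-synchronous BFS: build explicit frontier lists (distance = level index),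
--     # then rank nodes in a separate pass over the levels and combine at the end
--     seen = {R}
--     levels = []
--     frontier = [R]
--     while frontier:
--         levels.append(frontier)
--         nxt = []
--         for n in frontier:
--             for v in sorted(G[n]):
--                 if v not in seen:
--                     seen.add(v)
--                     nxt.append(v)
--         frontier = nxt
--     val = {}
--     rank = 0
--     d = 0
--     for lvl in levels:
--         for n in lvl:
--             rank += 1
--             val[n] = d * rank
--         d += 1
--     return [val.get(i, -1) for i in range(1, N + 1)]
-- ===== Notes on version B (the rewrite author's own statement) =====
-- stated objective: alternative
-- what changed: B replaces A's single dedup-on-dequeue deque loop (which writes dist*visit_count into the array in place) by a level-synchronous BFS that builds explicit frontier lists with distance = level index, then ranks nodes in a separate pass over the level lists and combines val.get(i,-1) in a final comprehension.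
-- outside the precondition, e.g. on BFS({1: [-1], -1: []}, 1, 1): A returns [2], B returns [0]
import Mathlib
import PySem

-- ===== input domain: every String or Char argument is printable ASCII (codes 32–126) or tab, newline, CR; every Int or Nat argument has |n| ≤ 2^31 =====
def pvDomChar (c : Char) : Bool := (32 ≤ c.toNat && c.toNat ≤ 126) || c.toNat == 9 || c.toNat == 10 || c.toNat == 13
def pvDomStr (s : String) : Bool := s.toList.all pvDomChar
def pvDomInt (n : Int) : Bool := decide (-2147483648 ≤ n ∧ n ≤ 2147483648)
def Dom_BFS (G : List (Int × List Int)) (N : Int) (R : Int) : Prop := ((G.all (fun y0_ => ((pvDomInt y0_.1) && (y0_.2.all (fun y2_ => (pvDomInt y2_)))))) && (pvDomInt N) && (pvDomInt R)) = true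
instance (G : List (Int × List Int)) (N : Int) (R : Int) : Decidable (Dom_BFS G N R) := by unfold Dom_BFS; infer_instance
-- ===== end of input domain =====

-- B replaces A's dedup-on-dequeue deque loop by a level-synchronous BFS: it builds explicit
-- frontier lists (distance = level index), then ranks the nodes in a separate pass over the
-- level lists and combines val.get(i,-1) in a final pass; equality of the RETURN value is proved.

-- ===== PORT A =====

-- termination helper for loopA: nodes that can still be newly visited, together with the queue length
def pvNodes (G : List (Int × List Int)) (q : List (Int × Int)) (vis : List Int) : Finset Int :=
  ((q.map Prod.fst).toFinset ∪ (G.flatMap Prod.snd).toFinset) \ vis.toFinset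

theorem pvNodes_skip (G : List (Int × List Int)) (n : Int) (d : Int) (rest : List (Int × Int))
    (vis : List Int) (h : n ∈ vis) : pvNodes G ((n, d) :: rest) vis = pvNodes G rest vis := by
  ext x
  simp only [pvNodes, List.map_cons, List.toFinset_cons, Finset.mem_sdiff, Finset.mem_union,
    Finset.mem_insert, List.mem_toFinset]
  constructor
  · rintro ⟨h1, h2⟩
    refine ⟨?_, h2⟩
    rcases h1 with (rfl | h1) | h1
    · exact absurd h h2
    · exact Or.inl h1
    · exact Or.inr h1
  · rintro ⟨h1, h2⟩
    exact ⟨by tauto, h2⟩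

theorem pvNodes_visit (G : List (Int × List Int)) (n : Int) (d : Int) (rest : List (Int × Int))
    (vis : List Int) (ns : List Int) (hn : n ∉ vis)
    (hg : PySem.Dict.get? (⟨G⟩ : PySem.Dict Int (List Int)) n = some ns) :
    (pvNodes G (rest ++ (PySem.List.sorted ns (fun x => x) false).map (fun v => (v, d + 1)))
        (PySem.Set.add vis n)).card < (pvNodes G ((n, d) :: rest) vis).card := by
  have hadd : PySem.Set.add vis n = vis ++ [n] := by
    simp [PySem.Set.add, List.contains_eq_mem, hn]
  rw [hadd]
  have hmemG : (n, ns) ∈ G := PySem.Dict.mem_items_of_get?_eq_some _ hg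
  have hns : ∀ v ∈ ns, v ∈ G.flatMap Prod.snd := fun v hv => List.mem_flatMap.2 ⟨(n, ns), hmemG, hv⟩
  have hsub : pvNodes G (rest ++ (PySem.List.sorted ns (fun x => x) false).map (fun v => (v, d + 1)))
      (vis ++ [n]) ⊆ pvNodes G ((n, d) :: rest) vis := by
    intro x hx
    simp only [pvNodes, Finset.mem_sdiff, Finset.mem_union, List.mem_toFinset, List.mem_map,
      List.mem_append, List.mem_cons] at hx ⊢
    obtain ⟨h1, h2⟩ := hx
    have hxv : x ∉ vis := fun h => h2 (Or.inl h)
    refine ⟨?_, hxv⟩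
    rcases h1 with ⟨p, hp, rfl⟩ | h1
    · rcases hp with hp | ⟨v, hv, rfl⟩
      · exact Or.inl ⟨p, Or.inr hp, rfl⟩
      · have hv' : v ∈ ns := (PySem.List.sorted_perm ns (fun x => x) false).mem_iff.1 hv
        exact Or.inr (hns _ hv')
    · exact Or.inr h1
  have hmem : n ∈ pvNodes G ((n, d) :: rest) vis := by
    simp only [pvNodes, Finset.mem_sdiff, Finset.mem_union, List.mem_toFinset, List.mem_map,
      List.mem_cons]
    exact ⟨Or.inl ⟨(n, d), Or.inl rfl, rfl⟩, hn⟩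
  have hnot : n ∉ pvNodes G
      (rest ++ (PySem.List.sorted ns (fun x => x) false).map (fun v => (v, d + 1))) (vis ++ [n]) := by
    simp [pvNodes]
  exact Finset.card_lt_card ((Finset.ssubset_iff_of_subset hsub).2 ⟨n, hmem, hnot⟩)

-- port of A: dedup-on-dequeue BFS writing d * visit_count into the visit array in place
def loopA (G : List (Int × List Int)) (visited : PySem.Set Int) (cnt : Int) (visit : List Int)
    (queue : List (Int × Int)) : List Int :=
  match queue with
  | [] => visit
  | (n, d) :: rest =>
    if hn : n ∈ visited then loopA G visited cnt visit rest
    else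
      match hg : PySem.Dict.get? (⟨G⟩ : PySem.Dict Int (List Int)) n with
      | none => visit      -- Python raises KeyError on G[n] here; excluded by Pre_BFS
      | some ns =>
        match PySem.List.pySet? visit n (d * (cnt + 1)) with
        | none => visit    -- Python raises IndexError on visit[n] here; excluded by Pre_BFS
        | some visit' =>
          loopA G (PySem.Set.add visited n) (cnt + 1) visit'
            (rest ++ (PySem.List.sorted ns (fun x => x) false).map (fun v => (v, d + 1)))
termination_by ((pvNodes G queue visited).card, queue.length)
decreasing_by
  · rw [pvNodes_skip G n d rest visited hn]
    exact Prod.Lex.right _ (by simp)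
  · exact Prod.Lex.left _ _ (pvNodes_visit G n d rest visited ns hn hg)

def BFS (G : List (Int × List Int)) (N : Int) (R : Int) : List Int :=
  PySem.List.slice (loopA G PySem.Set.empty 0 (PySem.List.pyRepeat [-1] (N + 1)) [(R, 0)])
    (some 1) none

-- ===== PORT B =====

-- body of 'if v not in seen: seen.add(v); nxt.append(v)'
def pvPushN (st : PySem.Set Int × List Int) (v : Int) : PySem.Set Int × List Int :=
  if v ∈ st.1 then st else (PySem.Set.add st.1 v, st.2 ++ [v])

-- body of one frontier node: 'for v in sorted(G[n]): …'
def pvNode (G : List (Int × List Int)) (st : PySem.Set Int × List Int) (n : Int) :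
    PySem.Set Int × List Int :=
  match PySem.Dict.get? (⟨G⟩ : PySem.Dict Int (List Int)) n with
  | none => st        -- Python raises KeyError on G[n] here; excluded by Pre_BFS
  | some ns => (PySem.List.sorted ns (fun x => x) false).foldl pvPushN st

-- termination lemmas for loopLevels (the port cites pvNode_card in decreasing_by)
theorem pvPushN_spec (ms : List Int) : ∀ (s acc : List Int),
    ∃ t : List Int, ms.foldl pvPushN (s, acc) = (s ++ t, acc ++ t) ∧
      ∀ x ∈ t, x ∈ ms ∧ x ∉ s := by
  induction ms with
  | nil => exact fun s acc => ⟨[], by simp⟩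
  | cons v ms ih =>
    intro s acc
    by_cases hv : v ∈ s
    · have h0 : pvPushN (s, acc) v = (s, acc) := by simp [pvPushN, hv]
      obtain ⟨t, h1, h3⟩ := ih s acc
      exact ⟨t, by simpa [h0] using h1,
        fun x hx => ⟨List.mem_cons_of_mem _ (h3 x hx).1, (h3 x hx).2⟩⟩
    · have h0 : pvPushN (s, acc) v = (s ++ [v], acc ++ [v]) := by
        simp [pvPushN, hv, PySem.Set.add, List.contains_eq_mem]
      obtain ⟨t, h1, h3⟩ := ih (s ++ [v]) (acc ++ [v])
      refine ⟨v :: t, ?_, ?_⟩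
      · rw [List.foldl_cons, h0, h1]; simp
      · intro x hx
        rcases List.mem_cons.1 hx with rfl | hx
        · exact ⟨List.mem_cons_self .., hv⟩
        · obtain ⟨ha, hb⟩ := h3 x hx
          exact ⟨List.mem_cons_of_mem _ ha, fun hs => hb (List.mem_append.2 (Or.inl hs))⟩

theorem pvNode_spec (G : List (Int × List Int)) (f : List Int) : ∀ (s acc : List Int),
    ∃ t : List Int, f.foldl (pvNode G) (s, acc) = (s ++ t, acc ++ t) ∧
      ∀ x ∈ t, x ∈ G.flatMap Prod.snd ∧ x ∉ s := by
  induction f with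
  | nil => exact fun s acc => ⟨[], by simp⟩
  | cons n f ih =>
    intro s acc
    rw [List.foldl_cons]
    cases hg : PySem.Dict.get? (⟨G⟩ : PySem.Dict Int (List Int)) n with
    | none =>
      have h0 : pvNode G (s, acc) n = (s, acc) := by simp [pvNode, hg]
      rw [h0]; exact ih s acc
    | some ns =>
      have h0 : pvNode G (s, acc) n =
          (PySem.List.sorted ns (fun x => x) false).foldl pvPushN (s, acc) := by
        simp [pvNode, hg]
      obtain ⟨t0, h1, h3⟩ := pvPushN_spec (PySem.List.sorted ns (fun x => x) false) s acc
      obtain ⟨t1, h4, h6⟩ := ih (s ++ t0) (acc ++ t0)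
      refine ⟨t0 ++ t1, ?_, ?_⟩
      · rw [h0, h1, h4]; simp
      · intro x hx
        have hmemG : (n, ns) ∈ G := PySem.Dict.mem_items_of_get?_eq_some _ hg
        rcases List.mem_append.1 hx with hx | hx
        · obtain ⟨ha, hb⟩ := h3 x hx
          exact ⟨List.mem_flatMap.2 ⟨(n, ns), hmemG,
            (PySem.List.sorted_perm ns (fun x => x) false).mem_iff.1 ha⟩, hb⟩
        · obtain ⟨ha, hb⟩ := h6 x hx
          exact ⟨ha, fun hs => hb (List.mem_append.2 (Or.inl hs))⟩

theorem pvNode_card (G : List (Int × List Int)) (f : List Int) (s acc : List Int) :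
    (((G.flatMap Prod.snd).toFinset \ (f.foldl (pvNode G) (s, acc)).1.toFinset).card <
      ((G.flatMap Prod.snd).toFinset \ s.toFinset).card) ∨
      f.foldl (pvNode G) (s, acc) = (s, acc) := by
  obtain ⟨t, h1, h3⟩ := pvNode_spec G f s acc
  cases t with
  | nil => right; simpa using h1
  | cons y t =>
    left
    rw [h1]
    apply Finset.card_lt_card
    rw [Finset.ssubset_iff_of_subset]
    · refine ⟨y, ?_, ?_⟩
      · obtain ⟨ha, hb⟩ := h3 y (List.mem_cons_self ..)
        simp only [Finset.mem_sdiff, List.mem_toFinset]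
        exact ⟨ha, hb⟩
      · simp only [Finset.mem_sdiff, List.mem_toFinset, not_and, not_not]
        intro _
        simp
    · intro x hx
      simp only [Finset.mem_sdiff, List.mem_toFinset, List.mem_append] at hx ⊢
      exact ⟨hx.1, fun h => hx.2 (Or.inl h)⟩

-- port of B's while loop: build the list of frontier levels
def loopLevels (G : List (Int × List Int)) (seen : PySem.Set Int) (frontier : List Int) :
    List (List Int) :=
  match frontier with
  | [] => []
  | x :: fr =>
    (x :: fr) :: loopLevels G ((x :: fr).foldl (pvNode G) (seen, [])).1
      ((x :: fr).foldl (pvNode G) (seen, [])).2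
termination_by (((G.flatMap Prod.snd).toFinset \ seen.toFinset).card, frontier.length)
decreasing_by
  rcases pvNode_card G (x :: fr) seen [] with h | h
  · exact Prod.Lex.left _ _ h
  · rw [h]
    exact Prod.Lex.right _ (by simp)

-- port of B's ranking pass: state is (val, rank, d); one call processes one level
def pvAssign (st : PySem.Dict Int Int × Int × Int) (lvl : List Int) :
    PySem.Dict Int Int × Int × Int :=
  ((lvl.foldl (fun s n => (PySem.Dict.insert s.1 n (st.2.2 * (s.2 + 1)), s.2 + 1)) (st.1, st.2.1)).1,
   (lvl.foldl (fun s n => (PySem.Dict.insert s.1 n (st.2.2 * (s.2 + 1)), s.2 + 1)) (st.1, st.2.1)).2,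
   st.2.2 + 1)

def BFS_alt (G : List (Int × List Int)) (N : Int) (R : Int) : List Int :=
  (PySem.List.pyRange 1 (N + 1) 1).map (fun i =>
    PySem.Dict.getD
      (((loopLevels G (PySem.Set.ofList [R]) [R]).foldl pvAssign (PySem.Dict.empty, 0, 0)).1)
      i (-1))

-- ===== PRECONDITION & SPEC =====

-- one closure step of the reachable-node set: add every neighbour of a node already in s
def pvStep (G : List (Int × List Int)) (s : PySem.Set Int) : PySem.Set Int :=
  PySem.Set.update s
    (s.flatMap (fun x => PySem.Dict.getD (⟨G⟩ : PySem.Dict Int (List Int)) x []))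

-- the set of nodes reachable from R in G (the closure is stationary after |edges|+1 steps)
def pvReach (G : List (Int × List Int)) (R : Int) : PySem.Set Int :=
  (pvStep G)^[(G.flatMap Prod.snd).length + 1] (PySem.Set.ofList [R])

-- Pre_BFS: R is a node of [0, N] and every node reachable from R lies in [0, N] and is a key of G
-- (this is where A's traversal completes: a reachable non-key raises KeyError, a reachable node
-- outside [-(N+1), N] raises IndexError, and a reachable negative node would return through
-- Python's negative-index wraparound, which is an artefact of A's visit-array implementation).
def Pre_BFS (G : List (Int × List Int)) (N : Int) (R : Int) : Prop :=
  0 ≤ R ∧ R ≤ N ∧ ∀ x ∈ pvReach G R,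
    0 ≤ x ∧ x ≤ N ∧ PySem.Dict.contains (⟨G⟩ : PySem.Dict Int (List Int)) x = true
instance (G : List (Int × List Int)) (N : Int) (R : Int) : Decidable (Pre_BFS G N R) := by
  unfold Pre_BFS; infer_instance

def pvWitness_BFS : (List (Int × List Int)) × Int × Int := ([(1, [2]), (2, [1, 2])], 2, 1)

def Spec_BFS (G : List (Int × List Int)) (N : Int) (R : Int) (out : List Int) : Prop := out = BFS_alt G N R
instance (G : List (Int × List Int)) (N : Int) (R : Int) (out : List Int) : Decidable (Spec_BFS G N R out) := by unfold Spec_BFS; infer_instance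

-- ===== CLAIM (what is proved, stated in full; the proofs are below) =====
def Claim_equal_BFS : Prop := ∀ (G : List (Int × List Int)) (N : Int) (R : Int), Dom_BFS G N R → Pre_BFS G N R → Spec_BFS G N R (BFS G N R)

-- ===== LEMMAS AND PROOFS =====

-- the first-occurrence filter relating A's duplicate-carrying queue to the frontier lists
def pvDedup (s : List Int) : List (Int × Int) → List (Int × Int)
  | [] => []
  | (n, d) :: q => if n ∈ s then pvDedup s q else (n, d) :: pvDedup (n :: s) q

theorem pvDedup_congr (l : List (Int × Int)) : ∀ (s s' : List Int), (∀ x, x ∈ s ↔ x ∈ s') →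
    pvDedup s l = pvDedup s' l := by
  induction l with
  | nil => intro s s' _; rfl
  | cons p q ih =>
    intro s s' h
    obtain ⟨n, d⟩ := p
    by_cases hn : n ∈ s
    · simp only [pvDedup, if_pos hn, if_pos ((h n).1 hn)]
      exact ih s s' h
    · simp only [pvDedup, if_neg hn, if_neg (fun hc => hn ((h n).2 hc))]
      refine congrArg _ (ih _ _ ?_)
      intro x
      simp only [List.mem_cons]
      exact or_congr Iff.rfl (h x)

theorem pvDedup_mem_fst (l : List (Int × Int)) : ∀ (s : List Int) (x : Int),
    (x ∈ (pvDedup s l).map Prod.fst) ↔ (x ∈ l.map Prod.fst ∧ x ∉ s) := by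
  induction l with
  | nil => simp [pvDedup]
  | cons p q ih =>
    intro s x
    obtain ⟨n, d⟩ := p
    by_cases hn : n ∈ s
    · rw [pvDedup, if_pos hn, ih]
      simp only [List.map_cons, List.mem_cons]
      constructor
      · rintro ⟨h1, h2⟩; exact ⟨Or.inr h1, h2⟩
      · rintro ⟨h1 | h1, h2⟩
        · subst h1; exact absurd hn h2
        · exact ⟨h1, h2⟩
    · rw [pvDedup, if_neg hn]
      simp only [List.map_cons, List.mem_cons, ih]
      constructor
      · rintro (rfl | ⟨h1, h2⟩)
        · exact ⟨Or.inl rfl, hn⟩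
        · exact ⟨Or.inr h1, fun hc => h2 (Or.inr hc)⟩
      · rintro ⟨rfl | h1, h2⟩
        · exact Or.inl rfl
        · by_cases hxn : x = n
          · exact Or.inl hxn
          · exact Or.inr ⟨h1, fun hc => hc.elim hxn h2⟩

theorem pvDedup_append (xs : List (Int × Int)) : ∀ (s : List Int) (ys : List (Int × Int)),
    pvDedup s (xs ++ ys) = pvDedup s xs ++ pvDedup (xs.map Prod.fst ++ s) ys := by
  induction xs with
  | nil => intro s ys; simp [pvDedup]
  | cons p q ih =>
    intro s ys
    obtain ⟨n, d⟩ := p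
    by_cases hn : n ∈ s
    · simp only [List.cons_append, pvDedup, if_pos hn, ih]
      refine congrArg _ (pvDedup_congr ys _ _ ?_)
      intro x
      simp only [List.map_cons, List.cons_append, List.mem_cons, List.mem_append]
      constructor
      · rintro (h | h | h) <;> tauto
      · rintro (rfl | h) <;> tauto
    · simp only [List.cons_append, pvDedup, if_neg hn, ih, List.cons_append]
      refine congrArg _ (congrArg _ (pvDedup_congr ys _ _ ?_))
      intro x
      simp only [List.map_cons, List.cons_append, List.mem_cons, List.mem_append]
      tauto

-- node-level ordered dedup (what pvPushN appends), and its relation to pvDedup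
def dN (s : List Int) : List Int → List Int
  | [] => []
  | v :: ms => if v ∈ s then dN s ms else v :: dN (v :: s) ms

theorem dN_congr (ms : List Int) : ∀ (s s' : List Int), (∀ x, x ∈ s ↔ x ∈ s') →
    dN s ms = dN s' ms := by
  induction ms with
  | nil => intro s s' _; rfl
  | cons v ms ih =>
    intro s s' h
    by_cases hv : v ∈ s
    · simp only [dN, if_pos hv, if_pos ((h v).1 hv)]
      exact ih s s' h
    · simp only [dN, if_neg hv, if_neg (fun hc => hv ((h v).2 hc))]
      refine congrArg _ (ih _ _ ?_)
      intro x
      simp only [List.mem_cons]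
      exact or_congr Iff.rfl (h x)

theorem mem_dN (ms : List Int) : ∀ (s : List Int) (x : Int),
    x ∈ dN s ms ↔ x ∈ ms ∧ x ∉ s := by
  induction ms with
  | nil => simp [dN]
  | cons v ms ih =>
    intro s x
    by_cases hv : v ∈ s
    · rw [dN, if_pos hv, ih]
      simp only [List.mem_cons]
      constructor
      · rintro ⟨h1, h2⟩; exact ⟨Or.inr h1, h2⟩
      · rintro ⟨rfl | h1, h2⟩
        · exact absurd hv h2
        · exact ⟨h1, h2⟩
    · rw [dN, if_neg hv]
      simp only [List.mem_cons, ih]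
      constructor
      · rintro (rfl | ⟨h1, h2⟩)
        · exact ⟨Or.inl rfl, hv⟩
        · exact ⟨Or.inr h1, fun hc => h2 (Or.inr hc)⟩
      · rintro ⟨rfl | h1, h2⟩
        · exact Or.inl rfl
        · by_cases hxv : x = v
          · exact Or.inl hxv
          · exact Or.inr ⟨h1, fun hc => hc.elim hxv h2⟩

theorem pvPushN_eq_dN (ms : List Int) : ∀ (s acc : List Int),
    ms.foldl pvPushN (s, acc) = (s ++ dN s ms, acc ++ dN s ms) := by
  induction ms with
  | nil => intro s acc; simp [dN]
  | cons v ms ih =>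
    intro s acc
    by_cases hv : v ∈ s
    · have h0 : pvPushN (s, acc) v = (s, acc) := by simp [pvPushN, hv]
      simp only [List.foldl_cons, h0, ih, dN, if_pos hv]
    · have h0 : pvPushN (s, acc) v = (s ++ [v], acc ++ [v]) := by
        simp [pvPushN, hv, PySem.Set.add, List.contains_eq_mem]
      have hc : dN (s ++ [v]) ms = dN (v :: s) ms := by
        apply dN_congr
        intro x
        simp only [List.mem_append, List.mem_cons]
        tauto
      simp only [List.foldl_cons, h0, ih, dN, if_neg hv, hc]
      simp

theorem pvDedup_map_dN (c : Int) (ms : List Int) : ∀ (s : List Int),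
    pvDedup s (ms.map (fun v => (v, c))) = (dN s ms).map (fun v => (v, c)) := by
  induction ms with
  | nil => intro s; rfl
  | cons v ms ih =>
    intro s
    by_cases hv : v ∈ s
    · simp only [List.map_cons, pvDedup, if_pos hv, dN, ih]
    · simp only [List.map_cons, pvDedup, if_neg hv, dN, ih, List.map_cons]

-- reachability closure (used by Pre_BFS)
theorem pvStep_mem (G : List (Int × List Int)) (s : PySem.Set Int) (x : Int) :
    x ∈ pvStep G s ↔ x ∈ s ∨
      x ∈ s.flatMap (fun y => PySem.Dict.getD (⟨G⟩ : PySem.Dict Int (List Int)) y []) :=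
  PySem.Set.mem_update _ _ _

theorem pvXs_sub (G : List (Int × List Int)) (s : PySem.Set Int) :
    ∀ y ∈ s.flatMap (fun x => PySem.Dict.getD (⟨G⟩ : PySem.Dict Int (List Int)) x []),
      y ∈ G.flatMap Prod.snd := by
  intro y hy
  obtain ⟨x, hx, hyx⟩ := List.mem_flatMap.1 hy
  rw [PySem.Dict.getD_eq_get?_getD] at hyx
  cases hg : PySem.Dict.get? (⟨G⟩ : PySem.Dict Int (List Int)) x with
  | none => rw [hg] at hyx; cases hyx
  | some vs =>
    rw [hg] at hyx
    exact List.mem_flatMap.2 ⟨(x, vs), PySem.Dict.mem_items_of_get?_eq_some _ hg, hyx⟩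

theorem pvIter_sub (G : List (Int × List Int)) (m : Nat) :
    ∀ (s : PySem.Set Int) (x : Int), x ∈ s → x ∈ (pvStep G)^[m] s := by
  induction m with
  | zero => intro s x hx; simpa using hx
  | succ m ih =>
    intro s x hx
    rw [Function.iterate_succ_apply]
    exact ih _ x ((pvStep_mem G s x).2 (Or.inl hx))

theorem pvStep_fix_iterate (G : List (Int × List Int)) (s : PySem.Set Int)
    (h : pvStep G s = s) (m : Nat) : (pvStep G)^[m] s = s := by
  induction m with
  | zero => rfl
  | succ m ih => rw [Function.iterate_succ_apply, h, ih]

theorem pvStep_eq_of_sub (G : List (Int × List Int)) (s : PySem.Set Int)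
    (h : ∀ y ∈ s.flatMap (fun x => PySem.Dict.getD (⟨G⟩ : PySem.Dict Int (List Int)) x []),
      y ∈ s) : pvStep G s = s := by
  rw [pvStep, PySem.Set.update_eq_append_filter]
  have : ((PySem.Set.ofList
      (s.flatMap (fun x => PySem.Dict.getD (⟨G⟩ : PySem.Dict Int (List Int)) x []))).filter
        (fun y => !(PySem.Set.contains s y))) = [] := by
    rw [List.filter_eq_nil_iff]
    intro y hy
    have hys : y ∈ s := h y ((PySem.Set.mem_ofList _ _).1 hy)
    simp [PySem.Set.contains_eq_listContains, List.contains_eq_mem, hys]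
  rw [this, List.append_nil]

theorem pvStep_stable (G : List (Int × List Int)) (U : Finset Int)
    (hUG : ∀ v ∈ G.flatMap Prod.snd, v ∈ U) :
    ∀ (c : Nat) (s : PySem.Set Int), (U \ s.toFinset).card ≤ c →
      pvStep G ((pvStep G)^[c] s) = (pvStep G)^[c] s := by
  intro c
  induction c with
  | zero =>
    intro s hc
    have hsub : ∀ x ∈ U, x ∈ s := by
      intro x hx
      by_contra hxs
      have : x ∈ U \ s.toFinset := Finset.mem_sdiff.2 ⟨hx, fun h => hxs (List.mem_toFinset.1 h)⟩
      have := Finset.card_pos.2 ⟨x, this⟩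
      omega
    exact pvStep_eq_of_sub G s (fun y hy => hsub y (hUG y (pvXs_sub G s y hy)))
  | succ c ih =>
    intro s hc
    by_cases hfix : pvStep G s = s
    · rw [pvStep_fix_iterate G s hfix]
      exact hfix
    · have happ := PySem.Set.update_eq_append_filter
        (s := s) (xs := s.flatMap (fun x => PySem.Dict.getD (⟨G⟩ : PySem.Dict Int (List Int)) x []))
      set t := ((PySem.Set.ofList
        (s.flatMap (fun x => PySem.Dict.getD (⟨G⟩ : PySem.Dict Int (List Int)) x []))).filter
          (fun y => !(PySem.Set.contains s y))) with ht
      have hstep : pvStep G s = s ++ t := by rw [pvStep]; exact happ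
      have htne : t ≠ [] := by
        intro h
        apply hfix
        rw [hstep, h, List.append_nil]
      obtain ⟨y, hy⟩ := List.exists_mem_of_ne_nil t htne
      have hyfil := List.mem_filter.1 hy
      have hyxs : y ∈ s.flatMap (fun x => PySem.Dict.getD (⟨G⟩ : PySem.Dict Int (List Int)) x []) :=
        (PySem.Set.mem_ofList _ _).1 hyfil.1
      have hyU : y ∈ U := hUG y (pvXs_sub G s y hyxs)
      have hys : y ∉ s := by
        have := hyfil.2
        simp only [PySem.Set.contains_eq_listContains, Bool.not_eq_true', List.contains_eq_mem,
          decide_eq_false_iff_not] at this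
        exact this
      have hystep : y ∈ pvStep G s := by rw [hstep]; exact List.mem_append.2 (Or.inr hy)
      have hsubset : U \ (pvStep G s).toFinset ⊆ U \ s.toFinset := by
        intro z hz
        obtain ⟨hz1, hz2⟩ := Finset.mem_sdiff.1 hz
        refine Finset.mem_sdiff.2 ⟨hz1, fun h => hz2 ?_⟩
        exact List.mem_toFinset.2 ((pvStep_mem G s z).2 (Or.inl (List.mem_toFinset.1 h)))
      have hcard : (U \ (pvStep G s).toFinset).card < (U \ s.toFinset).card := by
        apply Finset.card_lt_card
        rw [Finset.ssubset_iff_of_subset hsubset]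
        exact ⟨y, Finset.mem_sdiff.2 ⟨hyU, fun h => hys (List.mem_toFinset.1 h)⟩,
          fun h => (Finset.mem_sdiff.1 h).2 (List.mem_toFinset.2 hystep)⟩
      rw [Function.iterate_succ_apply]
      exact ih (pvStep G s) (by omega)

theorem pvReach_fix (G : List (Int × List Int)) (R : Int) :
    pvStep G (pvReach G R) = pvReach G R := by
  unfold pvReach
  apply pvStep_stable G (insert R (G.flatMap Prod.snd).toFinset)
    (fun v hv => Finset.mem_insert_of_mem (List.mem_toFinset.2 hv))
  calc (insert R (G.flatMap Prod.snd).toFinset \ (PySem.Set.ofList [R]).toFinset).card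
      ≤ (insert R (G.flatMap Prod.snd).toFinset).card := Finset.card_le_card (Finset.sdiff_subset)
    _ ≤ (G.flatMap Prod.snd).toFinset.card + 1 := Finset.card_insert_le _ _
    _ ≤ (G.flatMap Prod.snd).length + 1 := by
        have := (G.flatMap Prod.snd).toFinset_card_le
        omega

theorem pvReach_self (G : List (Int × List Int)) (R : Int) : R ∈ pvReach G R :=
  pvIter_sub G _ _ R (by simp [PySem.Set.ofList])

theorem pvReach_closed (G : List (Int × List Int)) (R x : Int) (vs : List Int) (v : Int)
    (hx : x ∈ pvReach G R)
    (hg : PySem.Dict.get? (⟨G⟩ : PySem.Dict Int (List Int)) x = some vs) (hv : v ∈ vs) :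
    v ∈ pvReach G R := by
  have hstep : v ∈ pvStep G (pvReach G R) :=
    (pvStep_mem G _ v).2 (Or.inr (List.mem_flatMap.2
      ⟨x, hx, by rw [PySem.Dict.getD_eq_get?_getD, hg]; exact hv⟩))
  rwa [pvReach_fix] at hstep

-- assign / contLevels bookkeeping
theorem pvAssign_cons (i : PySem.Dict Int Int) (c d : Int) (x : Int) (lvl : List Int) :
    pvAssign (i, c, d) (x :: lvl) = pvAssign (PySem.Dict.insert i x (d * (c + 1)), c + 1, d) lvl :=
  rfl

theorem assign_nil (i : PySem.Dict Int Int) (c d : Int) (ls : List (List Int)) :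
    (([] : List Int) :: ls).foldl pvAssign (i, c, d) = ls.foldl pvAssign (i, c, d + 1) :=
  rfl

-- the 'remainder of the current level' view of loopLevels used by the simulation
def contLevels (G : List (Int × List Int)) (seen : PySem.Set Int) (frontier nxt : List Int) :
    List (List Int) :=
  frontier :: loopLevels G (frontier.foldl (pvNode G) (seen, nxt)).1
    (frontier.foldl (pvNode G) (seen, nxt)).2

theorem loopLevels_cont (G : List (Int × List Int)) (seen : PySem.Set Int) (x : Int)
    (fr : List Int) : loopLevels G seen (x :: fr) = contLevels G seen (x :: fr) [] := by
  rw [loopLevels]; rfl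

theorem cont_step (G : List (Int × List Int)) (seen : PySem.Set Int) (nxt : List Int) (n : Int)
    (fr : List Int) (i : PySem.Dict Int Int) (c d : Int) :
    (contLevels G seen (n :: fr) nxt).foldl pvAssign (i, c, d) =
      (contLevels G (pvNode G (seen, nxt) n).1 fr (pvNode G (seen, nxt) n).2).foldl pvAssign
        (PySem.Dict.insert i n (d * (c + 1)), c + 1, d) := by
  simp only [contLevels, List.foldl_cons, pvAssign_cons, Prod.mk.eta]

theorem cont_shift (G : List (Int × List Int)) (seen : PySem.Set Int) (n : Int) (nx : List Int)
    (i : PySem.Dict Int Int) (c d : Int) :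
    (contLevels G seen [] (n :: nx)).foldl pvAssign (i, c, d) =
      (contLevels G seen (n :: nx) []).foldl pvAssign (i, c, d + 1) := by
  have h1 : contLevels G seen [] (n :: nx) = [] :: loopLevels G seen (n :: nx) := rfl
  rw [h1, assign_nil, loopLevels_cont]

theorem cont_nil (G : List (Int × List Int)) (seen : PySem.Set Int) (i : PySem.Dict Int Int)
    (c d : Int) : ((contLevels G seen [] []).foldl pvAssign (i, c, d)).1 = i := by
  have h0 : loopLevels G seen [] = [] := by rw [loopLevels]
  have h : contLevels G seen [] [] = [[]] := by
    unfold contLevels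
    simp only [List.foldl_nil, h0]
  rw [h, assign_nil]
  rfl

theorem pv_finalize (visit : List Int) (N : Int) (f : Int → Int) (hN : 0 ≤ N)
    (hlen : visit.length = (N + 1).toNat)
    (h : ∀ i : Int, 1 ≤ i → i ≤ N → PySem.List.pyGet? visit i = some (f i)) :
    PySem.List.slice visit (some 1) none = (PySem.List.pyRange 1 (N + 1) 1).map f := by
  rw [PySem.List.slice_from visit (by norm_num : (0:Int) ≤ 1), PySem.List.pyRange_one]
  have hN1 : ((N + 1) - 1).toNat = N.toNat := by omega
  rw [hN1, List.map_map]
  apply List.ext_getElem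
  · simp [hlen]; omega
  · intro k h1 h2
    simp only [List.getElem_drop, List.getElem_map, List.getElem_range, Function.comp]
    have hk : k < N.toNat := by simpa using h2
    have hg := h (1 + (k : Int)) (by omega) (by omega)
    rw [PySem.List.pyGet?_of_nonneg visit (by omega : (0:Int) ≤ 1 + k)] at hg
    have ht : (1 + (k : Int)).toNat = 1 + k := by omega
    rw [ht] at hg
    have hlt : 1 + k < visit.length := by omega
    rw [List.getElem?_eq_getElem hlt] at hg
    simpa using Option.some.inj hg

set_option maxHeartbeats 2000000 in
theorem pv_sim (G : List (Int × List Int)) (R : Int) (visited : PySem.Set Int) (cnt : Int)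
    (visit : List Int) (qa : List (Int × Int)) :
    ∀ (N : Int) (seen : PySem.Set Int) (frontier nxt : List Int) (info : PySem.Dict Int Int)
      (dl : Int),
    0 ≤ N →
    (∀ x ∈ pvReach G R,
        0 ≤ x ∧ x ≤ N ∧ PySem.Dict.contains (⟨G⟩ : PySem.Dict Int (List Int)) x = true) →
    visit.length = (N + 1).toNat →
    (∀ p ∈ qa, p.1 ∈ pvReach G R) →
    pvDedup visited qa = frontier.map (fun x => (x, dl)) ++ nxt.map (fun x => (x, dl + 1)) →
    (∀ x, x ∈ seen ↔ x ∈ visited ∨ x ∈ frontier ∨ x ∈ nxt) →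
    (∀ i : Int, 1 ≤ i → i ≤ N →
      match PySem.Dict.get? info i with
      | some v => i ∈ visited ∧ PySem.List.pyGet? visit i = some v
      | none => i ∉ visited ∧ PySem.List.pyGet? visit i = some (-1)) →
    PySem.List.slice (loopA G visited cnt visit qa) (some 1) none =
      (PySem.List.pyRange 1 (N + 1) 1).map (fun i =>
        PySem.Dict.getD (((contLevels G seen frontier nxt).foldl pvAssign (info, cnt, dl)).1)
          i (-1)) := by
  refine loopA.induct G (motive := fun visited cnt visit qa =>
      ∀ (N : Int) (seen : PySem.Set Int) (frontier nxt : List Int) (info : PySem.Dict Int Int)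
        (dl : Int),
      0 ≤ N →
      (∀ x ∈ pvReach G R,
          0 ≤ x ∧ x ≤ N ∧ PySem.Dict.contains (⟨G⟩ : PySem.Dict Int (List Int)) x = true) →
      visit.length = (N + 1).toNat →
      (∀ p ∈ qa, p.1 ∈ pvReach G R) →
      pvDedup visited qa = frontier.map (fun x => (x, dl)) ++ nxt.map (fun x => (x, dl + 1)) →
      (∀ x, x ∈ seen ↔ x ∈ visited ∨ x ∈ frontier ∨ x ∈ nxt) →
      (∀ i : Int, 1 ≤ i → i ≤ N →
        match PySem.Dict.get? info i with
        | some v => i ∈ visited ∧ PySem.List.pyGet? visit i = some v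
        | none => i ∉ visited ∧ PySem.List.pyGet? visit i = some (-1)) →
      PySem.List.slice (loopA G visited cnt visit qa) (some 1) none =
        (PySem.List.pyRange 1 (N + 1) 1).map (fun i =>
          PySem.Dict.getD (((contLevels G seen frontier nxt).foldl pvAssign (info, cnt, dl)).1)
            i (-1))) ?_ ?_ ?_ ?_ ?_ visited cnt visit qa
  -- case 1: empty queue
  · intro visited cnt visit N seen frontier nxt info dl hN hre hlen hqa hq hseen hinfo
    have hq0 : pvDedup visited ([] : List (Int × Int)) = [] := rfl
    rw [hq0] at hq
    obtain ⟨hf, hx⟩ := List.append_eq_nil_iff.1 hq.symm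
    rw [List.map_eq_nil_iff] at hf hx
    subst hf; subst hx
    rw [show loopA G visited cnt visit [] = visit from by rw [loopA], cont_nil]
    apply pv_finalize visit N _ hN hlen
    intro i h1 h2
    have hi := hinfo i h1 h2
    rw [PySem.Dict.getD_eq_get?_getD]
    cases hgi : PySem.Dict.get? info i with
    | some v => rw [hgi] at hi; exact hi.2
    | none => rw [hgi] at hi; exact hi.2
  -- case 2: head already visited, A skips
  · intro visited cnt visit n d rest hn ih
    intro N seen frontier nxt info dl hN hre hlen hqa hq hseen hinfo
    have hded : pvDedup visited ((n, d) :: rest) = pvDedup visited rest := by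
      simp [pvDedup, hn]
    rw [hded] at hq
    rw [show loopA G visited cnt visit ((n, d) :: rest) = loopA G visited cnt visit rest from by
      rw [loopA]; simp [hn]]
    exact ih N seen frontier nxt info dl hN hre hlen
      (fun p hp => hqa p (List.mem_cons_of_mem _ hp)) hq hseen hinfo
  -- case 3: key lookup fails — impossible under the invariant
  · intro visited cnt visit n d rest hn hg
    intro N seen frontier nxt info dl hN hre hlen hqa hq hseen hinfo
    have hqn := hre _ (hqa (n, d) (List.mem_cons_self ..))
    have hc := hqn.2.2
    rw [PySem.Dict.contains_eq_isSome_get?, hg] at hc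
    cases hc
  -- case 4: index assignment fails — impossible under the invariant
  · intro visited cnt visit n d rest hn ns hg hset
    intro N seen frontier nxt info dl hN hre hlen hqa hq hseen hinfo
    have hqn := hre _ (hqa (n, d) (List.mem_cons_self ..))
    have hir : ¬ PySem.Raise.InRange visit.length n :=
      (PySem.List.pySet?_eq_none_iff _ _ _).mp hset
    exfalso
    apply hir
    have h1 := hqn.1
    have h2 := hqn.2.1
    simp only [PySem.Raise.InRange, hlen]
    omega
  -- case 5: a new node is visited
  · intro visited cnt visit n d rest hn ns hg visit' hset ih
    intro N seen frontier nxt info dl hN hre hlen hqa hq hseen hinfo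
    have hnre : n ∈ pvReach G R := hqa (n, d) (List.mem_cons_self ..)
    have hqn := hre _ hnre
    have hvsb : ∀ v ∈ ns, v ∈ pvReach G R := fun v hv => pvReach_closed G R n ns v hnre hg hv
    have hn0 : (0:Int) ≤ n := hqn.1
    have hv' : visit' = visit.set n.toNat (d * (cnt + 1)) := by
      have h1 := PySem.List.pySetD_of_nonneg visit (d * (cnt + 1)) hn0
      rw [PySem.List.pySetD, hset] at h1
      simpa using h1
    have hlen' : visit'.length = (N + 1).toNat := by rw [hv', List.length_set, hlen]
    have hadd : PySem.Set.add visited n = visited ++ [n] := by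
      simp [PySem.Set.add, List.contains_eq_mem, hn]
    have haddm : ∀ x, x ∈ PySem.Set.add visited n ↔ x ∈ n :: visited := by
      intro x; rw [hadd]; simp [List.mem_append, or_comm]
    have hdedq : pvDedup visited ((n, d) :: rest) = (n, d) :: pvDedup (n :: visited) rest := by
      simp [pvDedup, hn]
    set M := PySem.List.sorted ns (fun x => x) false with hM
    have hMmem : ∀ v, v ∈ M ↔ v ∈ ns :=
      fun v => (PySem.List.sorted_perm ns (fun x => x) false).mem_iff
    -- the shared cons-configuration argument
    have main : ∀ (fr nx : List Int) (seen2 : PySem.Set Int),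
        pvDedup (n :: visited) rest = fr.map (fun x => (x, d)) ++ nx.map (fun x => (x, d + 1)) →
        (∀ x, x ∈ seen2 ↔ x ∈ visited ∨ x ∈ (n :: fr) ∨ x ∈ nx) →
        PySem.List.slice (loopA G visited cnt visit ((n, d) :: rest)) (some 1) none =
          (PySem.List.pyRange 1 (N + 1) 1).map (fun i =>
            PySem.Dict.getD
              (((contLevels G seen2 (n :: fr) nx).foldl pvAssign (info, cnt, d)).1) i (-1)) := by
      intro fr nx seen2 hq2 hseen2
      set L := dN seen2 M with hL
      have hnodestep : pvNode G (seen2, nx) n = (seen2 ++ L, nx ++ L) := by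
        simp only [pvNode, hg]
        exact pvPushN_eq_dN M seen2 nx
      -- one step of A
      rw [show loopA G visited cnt visit ((n, d) :: rest) =
          loopA G (PySem.Set.add visited n) (cnt + 1) visit'
            (rest ++ M.map (fun v => (v, d + 1))) from by
        rw [loopA, dif_neg hn]
        split
        · next heq => rw [hg] at heq; cases heq
        · next ns2 heq =>
          rw [hg] at heq
          obtain rfl := Option.some.inj heq
          rw [hset]]
      -- one step of B
      rw [cont_step, hnodestep]
      -- the dedup'd queue after the step
      have hq2fst : (pvDedup (n :: visited) rest).map Prod.fst = fr ++ nx := by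
        rw [hq2, List.map_append, List.map_map, List.map_map]
        simp [Function.comp_def]
      have hcongr1 : ∀ x : Int, x ∈ PySem.Set.add visited n ↔ x ∈ (n :: visited : List Int) :=
        haddm
      have hseenrest : ∀ x : Int,
          x ∈ rest.map Prod.fst ++ (n :: visited : List Int) ↔ x ∈ seen2 := by
        intro x
        have h1 := hseen2 x
        have h2 : x ∈ fr ++ nx ↔ x ∈ rest.map Prod.fst ∧ x ∉ (n :: visited : List Int) := by
          rw [← hq2fst, pvDedup_mem_fst]
        simp only [List.mem_append, List.mem_cons] at h1 h2 ⊢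
        by_cases hxn : x = n
        · subst hxn; tauto
        · by_cases hxv : x ∈ visited
          · tauto
          · tauto
      have hq' : pvDedup (PySem.Set.add visited n) (rest ++ M.map (fun v => (v, d + 1))) =
          fr.map (fun x => (x, d)) ++ (nx ++ L).map (fun x => (x, d + 1)) := by
        rw [pvDedup_congr _ _ (n :: visited) haddm, pvDedup_append]
        rw [pvDedup_congr (M.map (fun v => (v, d + 1))) _ seen2 hseenrest]
        rw [pvDedup_map_dN, hq2, ← hL]
        rw [List.map_append, List.append_assoc]
      apply ih N (seen2 ++ L) fr (nx ++ L) (PySem.Dict.insert info n (d * (cnt + 1))) d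
        hN hre hlen'
      · intro p hp
        rcases List.mem_append.1 hp with hp | hp
        · exact hqa p (List.mem_cons_of_mem _ hp)
        · obtain ⟨v, hv, rfl⟩ := List.mem_map.1 hp
          exact hvsb v ((hMmem v).1 hv)
      · exact hq'
      · intro x
        have h1 := hseen2 x
        have h2 : x ∈ L ↔ x ∈ M ∧ x ∉ seen2 := mem_dN M seen2 x
        have h3 := haddm x
        simp only [List.mem_append, List.mem_cons] at h1 h2 h3 ⊢
        tauto
      · intro i h1 h2
        rw [PySem.Dict.get?_insert]
        by_cases hin : i = n
        · subst hin
          rw [if_pos rfl]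
          refine ⟨(haddm i).2 (List.mem_cons_self ..), ?_⟩
          rw [hv', PySem.List.pyGet?_of_nonneg _ hn0,
            List.getElem?_set_self (by omega : i.toNat < visit.length)]
        · rw [if_neg hin]
          have hi := hinfo i h1 h2
          have hne : i.toNat ≠ n.toNat := by omega
          have hpg : PySem.List.pyGet? visit' i = PySem.List.pyGet? visit i := by
            rw [hv', PySem.List.pyGet?_of_nonneg _ (by omega : (0:Int) ≤ i),
              PySem.List.pyGet?_of_nonneg _ (by omega : (0:Int) ≤ i),
              List.getElem?_set_ne (fun h => hne h.symm)]
          cases hgi : PySem.Dict.get? info i with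
          | some v =>
            rw [hgi] at hi
            exact ⟨(haddm i).2 (List.mem_cons_of_mem _ hi.1), by rw [hpg]; exact hi.2⟩
          | none =>
            rw [hgi] at hi
            refine ⟨fun hc => ?_, by rw [hpg]; exact hi.2⟩
            rcases List.mem_cons.1 ((haddm i).1 hc) with h | h
            · exact hin h
            · exact hi.1 h
    -- dispatch on the shape of the current frontier
    cases frontier with
    | cons nf fr =>
      rw [hdedq, List.map_cons, List.cons_append] at hq
      obtain ⟨hh, htl⟩ := List.cons.injEq _ _ _ _ ▸ hq
      obtain ⟨rfl, rfl⟩ := Prod.mk.injEq .. ▸ hh.symm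
      exact main fr nxt seen htl hseen
    | nil =>
      rw [hdedq, List.map_nil, List.nil_append] at hq
      cases nxt with
      | nil => cases hq
      | cons m nx =>
        rw [List.map_cons] at hq
        obtain ⟨hh, htl⟩ := List.cons.injEq _ _ _ _ ▸ hq
        obtain ⟨rfl, hd⟩ := Prod.mk.injEq .. ▸ hh.symm
        rw [cont_shift, hd]
        refine main nx [] seen ?_ ?_
        · rw [htl, ← hd, List.map_nil, List.append_nil]
        · intro x
          have := hseen x
          simp only [List.mem_cons, List.not_mem_nil, or_false] at this ⊢
          tauto

-- ===== VERDICT (by name: the statement is the Claim_ definition above) =====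
theorem BFS_spec : Claim_equal_BFS := by
  intro G N R hdom hpre
  unfold Spec_BFS
  obtain ⟨hR0, hRN, hre⟩ := hpre
  have hN : (0:Int) ≤ N := le_trans hR0 hRN
  unfold BFS BFS_alt
  rw [loopLevels_cont]
  have hof : PySem.Set.ofList [R] = [R] := rfl
  rw [hof]
  apply pv_sim G R PySem.Set.empty 0 _ [(R, 0)] N [R] [R] [] PySem.Dict.empty 0 hN hre
  · rw [PySem.List.pyRepeat_singleton, List.length_replicate]
  · rintro p hp
    rcases List.mem_cons.1 hp with rfl | h
    · exact pvReach_self G R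
    · cases h
  · simp [pvDedup, PySem.Set.empty]
  · intro x
    simp [PySem.Set.empty]
  · intro i h1 h2
    simp only [PySem.Dict.get?_empty]
    refine ⟨by simp [PySem.Set.empty], ?_⟩
    rw [PySem.List.pyRepeat_singleton, PySem.List.pyGet?_of_nonneg _ (by omega : (0:Int) ≤ i),
      List.getElem?_replicate, if_pos (by omega : i.toNat < (N + 1).toNat)]
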